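-- pv_equiv track=rewrite | github.com/adwait-thattey/Study | Competitive Coding/HackerRank/GoodProblems/Algo/down_to_zero_2.py | gen_answers
-- ===== SOURCE A (Python) =====
-- INF = 999999
--
-- def gen_answers(limit):
--
--     arr = [INF]*limit
--
--     arr[0] = 0
--     arr[1] = 1
--     arr[2] = 2
--
--     for ix in range(2, limit):
--         arr[ix] = min(arr[ix],arr[ix-1] + 1)
--
--
--         for jx in range(2, ix+1):
--             px = ix*jx # product index
--             if  px >= len(arr):
--                 break
--             arr[px] = min(arr[px], arr[ix] + 1)
--
--     return arr
-- ===== SOURCE B (Python) =====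
-- INF = 999999
--
-- def gen_answers(limit):
--     # pull DP: arr[n] from arr[n-1] and from arr[n//d] over the divisors d of n
--     # with d*d <= n, read off per-target divisor lists built by a sieve first
--     arr = [INF] * limit
--     arr[0] = 0
--     arr[1] = 1
--     arr[2] = 2
--     divs = [[] for _ in range(limit)]
--     d = 2
--     while d * d < limit:
--         for m in range(d * d, limit, d):
--             divs[m].append(d)
--         d += 1
--     for n in range(3, limit):
--         v = arr[n - 1] + 1
--         if INF < v:
--             v = INF
--         for d in divs[n]:
--             t = arr[n // d] + 1
--             if t < v:
--                 v = t
--         arr[n] = v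
--     return arr
-- ===== Notes on version B (the rewrite author's own statement) =====
-- stated objective: alternative
-- what changed: Replaces A's interleaved push DP (each ix propagates arr[ix]+1 forward to its in-range multiples with an early break) by a pull DP: a divisor sieve first records, for every target n, its divisors d with d*d <= n, and a single pass then computes arr[n] from arr[n-1]+1 and arr[n//d]+1.
-- outside the precondition, e.g. on gen_answers(2): A raises IndexError, B raises IndexError
import Mathlib
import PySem

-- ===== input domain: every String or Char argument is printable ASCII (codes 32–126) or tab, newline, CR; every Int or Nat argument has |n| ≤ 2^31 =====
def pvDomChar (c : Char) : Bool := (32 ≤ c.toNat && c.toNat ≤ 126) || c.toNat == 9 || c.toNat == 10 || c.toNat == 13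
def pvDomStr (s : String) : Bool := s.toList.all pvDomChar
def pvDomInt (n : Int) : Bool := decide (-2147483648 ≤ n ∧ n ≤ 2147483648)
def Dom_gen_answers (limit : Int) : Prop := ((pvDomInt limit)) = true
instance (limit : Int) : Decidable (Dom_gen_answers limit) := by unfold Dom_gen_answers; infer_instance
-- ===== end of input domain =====

-- B replaces A's push DP over multiples by a pull DP over each target's divisors (alternative
-- decomposition, same values; not claimed faster).

-- ===== PORT A =====
def pvINF : Int := 999999

-- inner loop of A: for jx in range(2, ix+1): px = ix*jx; if px >= len(arr): break; arr[px] = min(...)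
def pvInnerA (ix : Nat) (a : List Int) : List Nat → List Int
  | [] => a
  | jx :: rest =>
    let px := ix * jx
    if a.length ≤ px then a
    else pvInnerA ix (a.set px (min (a.getD px 0) (a.getD ix 0 + 1))) rest

-- one iteration of A's outer loop (index ix)
def pvStepA (a : List Int) (ix : Nat) : List Int :=
  let a1 := a.set ix (min (a.getD ix 0) (a.getD (ix - 1) 0 + 1))
  pvInnerA ix a1 (List.range' 2 (ix + 1 - 2))

def gen_answers (limit : Int) : List Int :=
  let L := limit.toNat
  let a0 := (((List.replicate L pvINF).set 0 0).set 1 1).set 2 2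
  (List.range' 2 (L - 2)).foldl pvStepA a0

-- ===== PORT B =====
-- sieve phase of B: while d*d < limit: for m in range(d*d, limit, d): divs[m].append(d); d += 1
-- (List.range' (d*d) ((L - d*d - 1)/d + 1) d enumerates exactly Python's range(d*d, L, d) here,
--  since d*d < L)
def pvSieve (L : Nat) (t : List (List Nat)) (d : Nat) : List (List Nat) :=
  if h : d * d < L then
    pvSieve L
      ((List.range' (d * d) ((L - d * d - 1) / d + 1) d).foldl
        (fun t m => t.set m (t.getD m [] ++ [d])) t)
      (d + 1)
  else t
termination_by L - d
decreasing_by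
  have hdL : d < L := by
    rcases Nat.eq_zero_or_pos d with h0 | h1
    · subst h0; simpa using h
    · exact lt_of_le_of_lt (Nat.le_mul_of_pos_left d h1) h
  omega

-- one iteration of B's DP loop (index n): v = arr[n-1]+1; if INF < v: v = INF;
-- for d in divs[n]: t = arr[n//d]+1; if t < v: v = t; arr[n] = v
def pvStepB (divs : List (List Nat)) (arr : List Int) (n : Nat) : List Int :=
  let t1 := arr.getD (n - 1) 0 + 1
  let v2 := if pvINF < t1 then pvINF else t1
  let v := (divs.getD n []).foldl (fun v d =>
      let t := arr.getD (n / d) 0 + 1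
      if t < v then t else v) v2
  arr.set n v

def gen_answers_alt (limit : Int) : List Int :=
  let L := limit.toNat
  let a0 := (((List.replicate L pvINF).set 0 0).set 1 1).set 2 2
  let divs := pvSieve L (List.replicate L ([] : List Nat)) 2
  (List.range' 3 (L - 3)).foldl (pvStepB divs) a0

-- ===== PRECONDITION & SPEC =====
-- Pre_ excludes limit < 3, on which A (and B) raise IndexError while seeding arr[0..2].
def Pre_gen_answers (limit : Int) : Prop := 3 ≤ limit
instance (limit : Int) : Decidable (Pre_gen_answers limit) := by unfold Pre_gen_answers; infer_instance
def pvWitness_gen_answers : Int := (7)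

def Spec_gen_answers (limit : Int) (out : List Int) : Prop := out = gen_answers_alt limit
instance (limit : Int) (out : List Int) : Decidable (Spec_gen_answers limit out) := by unfold Spec_gen_answers; infer_instance

-- ===== CLAIM (what is proved, stated in full; the proofs are below) =====
def Claim_equal_gen_answers : Prop := ∀ (limit : Int), Dom_gen_answers limit → Pre_gen_answers limit → Spec_gen_answers limit (gen_answers limit)

-- ===== LEMMAS AND PROOFS =====

-- the common value both DPs compute at position n (pull recurrence, divisors up to sqrt n)
def pvF : Nat → Int
  | 0 => 0
  | 1 => 1
  | 2 => 2
  | n + 3 =>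
    (List.range' 2 ((n + 3).sqrt - 1)).attach.foldl
      (fun acc q =>
        if (n + 3) % q.1 = 0 then min acc (pvF ((n + 3) / q.1) + 1) else acc)
      (min pvINF (pvF (n + 2) + 1))
decreasing_by
  · have h2 : 2 ≤ q.1 := by
      have := q.2
      rw [List.mem_range'] at this
      omega
    have := Nat.div_lt_self (by omega : 0 < n + 3) (by omega : 1 < q.1)
    omega
  · omega

-- ---------- min-fold machinery ----------
def pvMfold (l : List Int) (s : Int) : Int := l.foldl min s

theorem pvMfold_le_seed (l : List Int) (s : Int) : pvMfold l s ≤ s := by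
  induction l generalizing s with
  | nil => simp [pvMfold]
  | cons x t ih => exact le_trans (ih (min s x)) (min_le_left _ _)

theorem pvMfold_le_mem (l : List Int) (s : Int) {y : Int} (hy : y ∈ l) : pvMfold l s ≤ y := by
  induction l generalizing s with
  | nil => cases hy
  | cons x t ih =>
    rcases List.mem_cons.1 hy with rfl | hy'
    · exact le_trans (pvMfold_le_seed t _) (min_le_right _ _)
    · exact ih _ hy'

theorem pvle_Mfold (l : List Int) (s : Int) {x : Int} (hs : x ≤ s) (h : ∀ y ∈ l, x ≤ y) :
    x ≤ pvMfold l s := by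
  induction l generalizing s with
  | nil => exact hs
  | cons z t ih =>
    exact ih _ (le_min hs (h z (List.mem_cons_self))) (fun y hy => h y (List.mem_cons_of_mem _ hy))

theorem pvMfold_eq_of_mem_iff (l1 l2 : List Int) (s : Int)
    (h12 : ∀ y ∈ l1, y ∈ l2) (h21 : ∀ y ∈ l2, y ∈ l1) : pvMfold l1 s = pvMfold l2 s := by
  apply le_antisymm
  · exact pvle_Mfold _ _ (pvMfold_le_seed _ _) (fun y hy => pvMfold_le_mem _ _ (h21 y hy))
  · exact pvle_Mfold _ _ (pvMfold_le_seed _ _) (fun y hy => pvMfold_le_mem _ _ (h12 y hy))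

theorem pvCondFold_eq_mfold (l : List Nat) (C : Nat → Prop) [DecidablePred C] (v : Nat → Int) (s : Int) :
    l.foldl (fun acc q => if C q then min acc (v q) else acc) s
      = pvMfold ((l.filter (fun q => decide (C q))).map v) s := by
  induction l generalizing s with
  | nil => rfl
  | cons x t ih =>
    by_cases h : C x <;> simp [pvMfold, h, ih]

theorem pvMin_mfold (l : List Int) (s x : Int) : min (pvMfold l s) x = pvMfold l (min s x) := by
  induction l generalizing s with
  | nil => rfl
  | cons z t ih =>
    simp only [pvMfold, List.foldl_cons] at *
    rw [ih]
    congr 1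
    simp [min_comm, min_left_comm]

-- ---------- pvF as a min-fold over the divisor candidates ----------
def pvCands (n : Nat) : List Int :=
  ((List.range' 2 (n.sqrt - 1)).filter (fun q => decide (n % q = 0))).map (fun q => pvF (n / q) + 1)

theorem pvAttach_fold (l : List Nat) (C : Nat → Prop) [DecidablePred C] (v : Nat → Int) (s : Int) :
    l.attach.foldl (fun acc q => if C q.1 then min acc (v q.1) else acc) s
      = l.foldl (fun acc q => if C q then min acc (v q) else acc) s := by
  simp

theorem pvF_ge3 (n : Nat) (h : 3 ≤ n) :
    pvF n = pvMfold (pvCands n) (min pvINF (pvF (n - 1) + 1)) := by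
  obtain ⟨m, rfl⟩ : ∃ m, n = m + 3 := ⟨n - 3, by omega⟩
  show pvF (m + 3) = _
  rw [pvF, pvAttach_fold (List.range' 2 ((m + 3).sqrt - 1)) (fun q => (m + 3) % q = 0)
      (fun q => pvF ((m + 3) / q) + 1), pvCondFold_eq_mfold]
  rfl

-- ---------- push-side model ----------
-- value at position i after outer indices 2..k of A have pushed to their multiples
def pvG (k i : Nat) : Int :=
  (List.range' 2 (k - 1)).foldl
    (fun acc p => if i % p = 0 ∧ 2 ≤ i / p ∧ i / p ≤ p then min acc (pvF p + 1) else acc) pvINF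

theorem pvG_succ (k i : Nat) (hk : 1 ≤ k) :
    pvG (k + 1) i = if i % (k + 1) = 0 ∧ 2 ≤ i / (k + 1) ∧ i / (k + 1) ≤ k + 1
      then min (pvG k i) (pvF (k + 1) + 1) else pvG k i := by
  unfold pvG
  have h1 : k + 1 - 1 = (k - 1) + 1 := by omega
  have h2 : 2 + (k - 1) = k + 1 := by omega
  rw [h1]
  have hc := List.range'_concat (s := 2) (n := k - 1) (step := 1)
  simp only [one_mul] at hc
  rw [hc, h2, List.foldl_append]
  simp

-- the key push/pull exchange: A's pending pushes into k+1, refined by the chain step,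
-- give exactly B's pull recurrence at k+1
theorem pvKey (k : Nat) (hk : 2 ≤ k) : pvF (k + 1) = min (pvG k (k + 1)) (pvF k + 1) := by
  have hF := pvF_ge3 (k + 1) (by omega)
  have h1 : k + 1 - 1 = k := by omega
  rw [h1] at hF
  unfold pvG
  rw [pvCondFold_eq_mfold, pvMin_mfold, hF]
  apply pvMfold_eq_of_mem_iff
  · -- pull candidate (divisor q ≤ sqrt) → push candidate (cofactor p = (k+1)/q)
    intro y hy
    simp only [pvCands, List.mem_map, List.mem_filter, List.mem_range',
      decide_eq_true_eq] at hy ⊢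
    obtain ⟨q, ⟨⟨iq, hiq, hqe⟩, hdvd⟩, rfl⟩ := hy
    have hq2 : 2 ≤ q := by omega
    have hqs : q ≤ (k + 1).sqrt := by omega
    have hqq : q * q ≤ k + 1 := Nat.le_sqrt.1 hqs
    obtain ⟨p, hp⟩ := Nat.dvd_of_mod_eq_zero hdvd
    have hpval : (k + 1) / q = p := by rw [hp]; exact Nat.mul_div_cancel_left p (by omega)
    have hp0 : 0 < p := by
      rcases Nat.eq_zero_or_pos p with h0 | h1
      · subst h0; simp at hp
      · exact h1
    have hqval : (k + 1) / p = q := by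
      rw [hp, mul_comm]; exact Nat.mul_div_cancel_left q hp0
    have hqp : q ≤ p := Nat.le_of_mul_le_mul_left (by rw [← hp]; exact hqq) (by omega)
    have hpk : p ≤ k := by
      have h2p : 2 * p ≤ q * p := Nat.mul_le_mul_right p hq2
      omega
    refine ⟨p, ⟨⟨p - 2, by omega, by omega⟩, ?_, ?_, ?_⟩, by rw [hpval]⟩
    · rw [hp]; exact Nat.mul_mod_left q p
    · rw [hqval]; exact hq2
    · rw [hqval]; exact hqp
  · -- push candidate (p with cofactor q = (k+1)/p ≤ p) → pull candidate (divisor q)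
    intro y hy
    simp only [pvCands, List.mem_map, List.mem_filter, List.mem_range',
      decide_eq_true_eq] at hy ⊢
    obtain ⟨p, ⟨⟨ip, hip, hpe⟩, hdvd, hq2, hqp⟩, rfl⟩ := hy
    have hp2 : 2 ≤ p := by omega
    obtain ⟨q, hq⟩ := Nat.dvd_of_mod_eq_zero hdvd
    have hqval : (k + 1) / p = q := by rw [hq]; exact Nat.mul_div_cancel_left q (by omega)
    have hpval : (k + 1) / q = p := by
      rw [hq, mul_comm]; exact Nat.mul_div_cancel_left p (by
        rcases Nat.eq_zero_or_pos q with h0 | h1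
        · omega
        · exact h1)
    have hq0 : 0 < q := by
      rcases Nat.eq_zero_or_pos q with h0 | h1
      · rw [h0] at hq; omega
      · exact h1
    rw [hqval] at hq2 hqp
    have hqq : q * q ≤ k + 1 := by
      calc q * q ≤ q * p := Nat.mul_le_mul_left q hqp
        _ = k + 1 := by rw [hq, mul_comm]
    have hqs : q ≤ (k + 1).sqrt := Nat.le_sqrt.2 hqq
    refine ⟨q, ⟨⟨q - 2, by omega, by omega⟩, ?_⟩, by rw [hpval]⟩
    · rw [hq]; exact Nat.mul_mod_left p q

-- ---------- array model ----------
def pvMapG {α : Type} (L : Nat) (g : Nat → α) : List α := (List.range L).map g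

def pvInit (i : Nat) : Int :=
  if i = 0 then 0 else if i = 1 then 1 else if i = 2 then 2 else pvINF

theorem pvMapG_length {α : Type} (L : Nat) (g : Nat → α) : (pvMapG L g).length = L := by
  simp [pvMapG]

theorem pvMapG_getD {α : Type} (L : Nat) (g : Nat → α) (i : Nat) (d0 : α) (h : i < L) :
    (pvMapG L g).getD i d0 = g i := by
  simp [pvMapG, List.getD_eq_getElem?_getD, h]

theorem pvMapG_set {α : Type} (L : Nat) (g : Nat → α) (i : Nat) (v : α) (_h : i < L) :
    (pvMapG L g).set i v = pvMapG L (fun j => if j = i then v else g j) := by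
  apply List.ext_getElem
  · simp [pvMapG]
  · intro j hj1 hj2
    simp only [pvMapG, List.getElem_set, List.getElem_map, List.getElem_range]
    by_cases hji : j = i
    · simp [hji]
    · simp [hji, Ne.symm hji]

theorem pvMapG_congr {α : Type} (L : Nat) (g1 g2 : Nat → α) (h : ∀ i, i < L → g1 i = g2 i) :
    pvMapG L g1 = pvMapG L g2 := by
  unfold pvMapG
  exact List.map_congr_left (fun i hi => h i (List.mem_range.1 hi))

theorem pvInit_spec (L : Nat) (_h3 : 3 ≤ L) :
    (((List.replicate L pvINF).set 0 0).set 1 1).set 2 2 = pvMapG L pvInit := by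
  apply List.ext_getElem
  · simp [pvMapG]
  · intro j hj1 hj2
    simp only [pvMapG, List.getElem_set, List.getElem_map, List.getElem_range,
      List.getElem_replicate, pvInit]
    split_ifs <;> omega

theorem pvF_le2 (i : Nat) (h : i ≤ 2) : pvF i = pvInit i := by
  interval_cases i <;> simp [pvF, pvInit]

-- ---------- B-side: the sieve builds each target's small-divisor list ----------
def pvSmallDivs (m : Nat) : List Nat :=
  (List.range' 2 (m.sqrt - 1)).filter (fun q => decide (m % q = 0))

-- state of divs after outer sieve indices 2..D-1
def pvDivs (D m : Nat) : List Nat :=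
  (List.range' 2 (D - 2)).filter (fun e => decide (m % e = 0 ∧ e * e ≤ m))

theorem pvCands_eq (n : Nat) :
    pvCands n = (pvSmallDivs n).map (fun q => pvF (n / q) + 1) := rfl

theorem pvSieveInner_spec (L d : Nat) (hd : 2 ≤ d) :
    ∀ (cnt a : Nat) (g : Nat → List Nat), d ∣ a →
    (List.range' a cnt d).foldl (fun t m => t.set m (t.getD m [] ++ [d])) (pvMapG L g)
      = pvMapG L (fun m =>
          if a ≤ m ∧ m < a + cnt * d ∧ m % d = 0 ∧ m < L then g m ++ [d] else g m) := by
  intro cnt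
  induction cnt with
  | zero =>
    intro a g _
    exact (pvMapG_congr _ _ _ (fun i _ => by rw [if_neg]; rintro ⟨h1, h2, _⟩; omega)).symm
  | succ cnt ih =>
    intro a g hdvd
    rw [List.range'_succ ..]
    simp only [List.foldl_cons]
    have hstep : ((pvMapG L g).set a ((pvMapG L g).getD a [] ++ [d]))
        = pvMapG L (fun j => if j = a ∧ a < L then g a ++ [d] else g j) := by
      by_cases haL : a < L
      · rw [pvMapG_getD L g a [] haL, pvMapG_set L g a _ haL]
        exact pvMapG_congr _ _ _ (fun i _ => by
          by_cases hia : i = a <;> simp [hia, haL])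
      · rw [List.set_eq_of_length_le (by rw [pvMapG_length]; omega)]
        exact pvMapG_congr _ _ _ (fun i _ => by
          by_cases hia : i = a <;> simp [hia, haL])
    rw [hstep, ih (a + d) _ (Nat.dvd_add hdvd (dvd_refl d))]
    apply pvMapG_congr
    intro i hiL
    have hcd : (cnt + 1) * d = cnt * d + d := by ring
    have hmoda : a % d = 0 := Nat.mod_eq_zero_of_dvd hdvd
    by_cases hia : i = a
    · subst hia
      rw [if_neg (by rintro ⟨h1, _⟩; omega),
        if_pos (show i ≤ i ∧ i < i + (cnt + 1) * d ∧ i % d = 0 ∧ i < L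
          from ⟨le_refl i, by omega, hmoda, hiL⟩)]
      simp [hiL]
    · by_cases hm0 : i % d = 0
      · have hdi : d ∣ i := Nat.dvd_of_mod_eq_zero hm0
        have hiff : (a + d ≤ i ∧ i < a + d + cnt * d ∧ i % d = 0 ∧ i < L)
            ↔ (a ≤ i ∧ i < a + (cnt + 1) * d ∧ i % d = 0 ∧ i < L) := by
          constructor
          · rintro ⟨h1, h2, h3, h4⟩
            exact ⟨by omega, by omega, h3, h4⟩
          · rintro ⟨h1, h2, h3, h4⟩
            have hd_le : d ≤ i - a := Nat.le_of_dvd (by omega) (Nat.dvd_sub hdi hdvd)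
            exact ⟨by omega, by omega, h3, h4⟩
        simp only [hiff]
        simp [hia]
      · simp [hm0, hia]

theorem pvDivs_stable (d m : Nat) (hm : m < d * d) : pvDivs d m = pvSmallDivs m := by
  have hsd : m.sqrt < d := Nat.sqrt_lt.2 hm
  unfold pvDivs pvSmallDivs
  by_cases hs : m.sqrt ≤ 1
  · have h1 : m.sqrt - 1 = 0 := by omega
    rw [h1]
    have hnil : (List.range' 2 (d - 2)).filter (fun e => decide (m % e = 0 ∧ e * e ≤ m)) = [] := by
      apply List.filter_eq_nil_iff.2
      intro e he
      rw [List.mem_range'] at he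
      obtain ⟨j, hj, hje⟩ := he
      have hme : m < e * e := Nat.sqrt_lt.1 (show m.sqrt < e by omega)
      simp only [one_mul] at hje
      simp
      intro _
      omega
    rw [hnil]
    rfl
  · have hs2 : 2 ≤ m.sqrt := by omega
    rw [show d - 2 = (m.sqrt - 1) + (d - 1 - m.sqrt) by omega, ← List.range'_append ..,
      List.filter_append]
    have hnil : (List.range' (2 + 1 * (m.sqrt - 1)) (d - 1 - m.sqrt)).filter
        (fun e => decide (m % e = 0 ∧ e * e ≤ m)) = [] := by
      apply List.filter_eq_nil_iff.2
      intro e he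
      rw [List.mem_range'] at he
      obtain ⟨j, hj, hje⟩ := he
      have hme : m < e * e := Nat.sqrt_lt.1 (show m.sqrt < e by omega)
      simp
      intro _
      omega
    rw [hnil, List.append_nil]
    apply List.filter_congr
    intro e he
    rw [List.mem_range'] at he
    obtain ⟨j, hj, hje⟩ := he
    have hee : e * e ≤ m := Nat.le_sqrt.1 (show e ≤ m.sqrt by omega)
    simp [hee]

theorem pvSieve_spec (L : Nat) (fuel : Nat) : ∀ d, 2 ≤ d → L ≤ fuel + d →
    pvSieve L (pvMapG L (fun m => pvDivs d m)) d = pvMapG L (fun m => pvSmallDivs m) := by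
  induction fuel with
  | zero =>
    intro d hd hLd
    have hdd2 : d ≤ d * d := Nat.le_mul_of_pos_left d (by omega)
    have hnot : ¬ d * d < L := by omega
    rw [pvSieve]
    simp only [hnot, dif_neg, not_false_iff]
    exact pvMapG_congr _ _ _ (fun m hm => pvDivs_stable d m (by omega))
  | succ fuel ih =>
    intro d hd hLd
    rw [pvSieve]
    by_cases hdd : d * d < L
    · simp only [hdd, dif_pos]
      rw [pvSieveInner_spec L d hd ((L - d * d - 1) / d + 1) (d * d) _ (dvd_mul_right d d)]
      have hmid : pvMapG L (fun m =>
            if d * d ≤ m ∧ m < d * d + ((L - d * d - 1) / d + 1) * d ∧ m % d = 0 ∧ m < L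
            then pvDivs d m ++ [d] else pvDivs d m)
          = pvMapG L (fun m => pvDivs (d + 1) m) := by
        apply pvMapG_congr
        intro m hm
        have h1 := Nat.div_add_mod (L - d * d - 1) d
        have h2 : (L - d * d - 1) % d < d := Nat.mod_lt _ (by omega)
        have h3 : ((L - d * d - 1) / d + 1) * d = d * ((L - d * d - 1) / d) + d := by ring
        have hwin : L - 1 < d * d + ((L - d * d - 1) / d + 1) * d := by omega
        have hrc : List.range' 2 (d + 1 - 2) = List.range' 2 (d - 2) ++ [d] := by
          have hcc := List.range'_concat (s := 2) (n := d - 2) (step := 1)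
          simp only [one_mul] at hcc
          rw [show d + 1 - 2 = (d - 2) + 1 by omega, hcc, show 2 + (d - 2) = d by omega]
        show _ = pvDivs (d + 1) m
        unfold pvDivs
        rw [hrc, List.filter_append]
        by_cases hc : m % d = 0 ∧ d * d ≤ m
        · rw [if_pos ⟨hc.2, by omega, hc.1, hm⟩]
          simp [hc.1, hc.2]
        · rw [if_neg (by rintro ⟨x1, x2, x3, x4⟩; exact hc ⟨x3, x1⟩)]
          have hone : [d].filter (fun e => decide (m % e = 0 ∧ e * e ≤ m)) = [] := by
            simp [List.filter, hc]
          rw [hone, List.append_nil]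
      rw [hmid]
      exact ih (d + 1) (by omega) (by omega)
    · simp only [hdd, dif_neg, not_false_iff]
      exact pvMapG_congr _ _ _ (fun m hm => pvDivs_stable d m (by omega))

def pvGB (n i : Nat) : Int := if i < n then pvF i else pvInit i

theorem pvDPfold_spec (L n : Nat) (g : Nat → Int) (hg : ∀ m, m < n → g m = pvF m) (hnL : n < L) :
    ∀ (l : List Nat) (v : Int), (∀ e ∈ l, 2 ≤ e ∧ e * e ≤ n) →
    l.foldl (fun v e =>
        let t := (pvMapG L g).getD (n / e) 0 + 1
        if t < v then t else v) v
      = pvMfold (l.map (fun e => pvF (n / e) + 1)) v := by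
  intro l
  induction l with
  | nil => intro v _; rfl
  | cons e t ih =>
    intro v hmem
    obtain ⟨he2, hee⟩ := hmem e (List.mem_cons_self)
    have hn4 : 2 * 2 ≤ n := le_trans (Nat.mul_le_mul he2 he2) hee
    have hlt : n / e < n := Nat.div_lt_self (by omega) (by omega)
    simp only [List.foldl_cons]
    rw [pvMapG_getD L g _ 0 (by omega), hg _ hlt]
    have hbody : (if pvF (n / e) + 1 < v then pvF (n / e) + 1 else v) = min v (pvF (n / e) + 1) := by
      rw [min_def]; split_ifs <;> omega
    rw [hbody, ih _ (fun x hx => hmem x (List.mem_cons_of_mem _ hx))]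
    rfl

theorem pvStepB_spec (L n : Nat) (h3 : 3 ≤ n) (hnL : n < L) :
    pvStepB (pvMapG L pvSmallDivs) (pvMapG L (pvGB n)) n = pvMapG L (pvGB (n + 1)) := by
  have hdef : pvStepB (pvMapG L pvSmallDivs) (pvMapG L (pvGB n)) n
      = (pvMapG L (pvGB n)).set n
          (((pvMapG L pvSmallDivs).getD n []).foldl (fun v d =>
            if (pvMapG L (pvGB n)).getD (n / d) 0 + 1 < v
            then (pvMapG L (pvGB n)).getD (n / d) 0 + 1 else v)
            (if pvINF < (pvMapG L (pvGB n)).getD (n - 1) 0 + 1 then pvINF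
             else (pvMapG L (pvGB n)).getD (n - 1) 0 + 1)) := rfl
  rw [hdef, pvMapG_getD L pvSmallDivs n [] hnL, pvMapG_getD L (pvGB n) (n - 1) 0 (by omega)]
  have hgn1 : pvGB n (n - 1) = pvF (n - 1) := by simp [pvGB]; omega
  rw [hgn1]
  have hseed : (if pvINF < pvF (n - 1) + 1 then pvINF else pvF (n - 1) + 1)
      = min pvINF (pvF (n - 1) + 1) := by
    rw [min_def]; split_ifs <;> omega
  rw [hseed]
  have hfold := pvDPfold_spec L n (pvGB n)
    (fun m hm => by simp [pvGB, hm]) hnL (pvSmallDivs n)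
    (min pvINF (pvF (n - 1) + 1))
    (fun e he => by
      simp only [pvSmallDivs, List.mem_filter, List.mem_range', decide_eq_true_eq] at he
      obtain ⟨⟨j, hj, hje⟩, _⟩ := he
      refine ⟨by omega, Nat.le_sqrt.1 (by omega)⟩)
  simp only at hfold
  rw [hfold, ← pvCands_eq, ← pvF_ge3 n h3, pvMapG_set L _ n _ hnL]
  apply pvMapG_congr
  intro i hi
  by_cases hin : i = n
  · simp [hin, pvGB]
  · have hiff : (i < n) ↔ (i ≤ n) := by omega
    simp [hin, pvGB, hiff]

theorem pvLoopB (L : Nat) : ∀ t, 3 + t ≤ L →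
    (List.range' 3 t).foldl (pvStepB (pvMapG L pvSmallDivs)) (pvMapG L (pvGB 3))
      = pvMapG L (pvGB (3 + t)) := by
  intro t
  induction t with
  | zero => intro _; simp
  | succ t ih =>
    intro h
    have hc := List.range'_concat (s := 3) (n := t) (step := 1)
    simp only [one_mul] at hc
    rw [hc, List.foldl_append, ih (by omega)]
    simp only [List.foldl_cons, List.foldl_nil]
    rw [pvStepB_spec L (3 + t) (by omega) (by omega)]
    have : 3 + t + 1 = 3 + (t + 1) := by omega
    rw [this]

theorem pvB_result (limit : Int) (h : 3 ≤ limit) :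
    gen_answers_alt limit = pvMapG limit.toNat pvF := by
  have hL : 3 ≤ limit.toNat := by omega
  have hdef : gen_answers_alt limit = (List.range' 3 (limit.toNat - 3)).foldl
      (pvStepB (pvSieve limit.toNat (List.replicate limit.toNat ([] : List Nat)) 2))
      ((((List.replicate limit.toNat pvINF).set 0 0).set 1 1).set 2 2) := rfl
  have hrepl : List.replicate limit.toNat ([] : List Nat)
      = pvMapG limit.toNat (fun m => pvDivs 2 m) := by
    apply List.ext_getElem
    · simp [pvMapG]
    · intro j hj1 hj2
      simp [pvMapG, pvDivs]
  rw [hdef, hrepl, pvSieve_spec limit.toNat limit.toNat 2 (by omega) (by omega),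
    pvInit_spec limit.toNat hL]
  have hbase : pvMapG limit.toNat pvInit = pvMapG limit.toNat (pvGB 3) :=
    pvMapG_congr _ _ _ (fun i _ => by
      by_cases hi : i < 3
      · simp [pvGB, hi, pvF_le2 i (by omega)]
      · simp [pvGB, hi])
  rw [hbase, pvLoopB limit.toNat (limit.toNat - 3) (by omega)]
  apply pvMapG_congr
  intro i hi
  simp [pvGB, show i < 3 + (limit.toNat - 3) by omega]

-- ---------- A-side invariant ----------
theorem pvInnerA_spec (L ix : Nat) (hix : 2 ≤ ix) (hixL : ix < L) :
    ∀ (m s : Nat) (g : Nat → Int), 2 ≤ s →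
    pvInnerA ix (pvMapG L g) (List.range' s m)
      = pvMapG L (fun i => if i % ix = 0 ∧ s ≤ i / ix ∧ i / ix < s + m ∧ i < L
          then min (g i) (g ix + 1) else g i) := by
  intro m
  induction m with
  | zero =>
    intro s g hs
    show pvInnerA ix (pvMapG L g) [] = _
    rw [pvInnerA]
    exact (pvMapG_congr _ _ _ (fun i hi => by
      rw [if_neg]; rintro ⟨_, h1, h2, _⟩; omega)).symm
  | succ m ih =>
    intro s g hs
    rw [List.range'_succ ..]
    rw [pvInnerA]
    simp only [pvMapG_length]
    by_cases hb : L ≤ ix * s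
    · rw [if_pos hb]
      refine (pvMapG_congr _ _ _ (fun i hi => ?_)).symm
      rw [if_neg]
      rintro ⟨hm0, h1, h2, hiL⟩
      have hdvd : ix ∣ i := Nat.dvd_of_mod_eq_zero hm0
      have hle : ix * s ≤ i := by
        calc ix * s ≤ ix * (i / ix) := Nat.mul_le_mul_left ix h1
          _ = i := by rw [mul_comm]; exact Nat.div_mul_cancel hdvd
      omega
    · rw [if_neg hb]
      rw [Nat.not_le] at hb
      rw [pvMapG_getD _ _ (ix * s) 0 hb, pvMapG_getD _ _ ix 0 hixL, pvMapG_set _ _ _ _ hb,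
        ih (s + 1) _ (by omega)]
      apply pvMapG_congr
      intro i hi
      have h2x : ix * 2 ≤ ix * s := Nat.mul_le_mul_left ix hs
      have hixne : ix ≠ ix * s := by omega
      by_cases hieq : i = ix * s
      · subst hieq
        have hmod0 : (ix * s) % ix = 0 := Nat.mul_mod_right ix s
        have hdiv : ix * s / ix = s := Nat.mul_div_cancel_left s (show 0 < ix by omega)
        rw [if_neg (by rintro ⟨_, hb1, _, _⟩; omega),
          if_pos (show ix * s % ix = 0 ∧ s ≤ ix * s / ix ∧ ix * s / ix < s + (m + 1) ∧ ix * s < L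
            from ⟨hmod0, by omega, by omega, hi⟩)]
        simp
      · by_cases hm0 : i % ix = 0
        · have hdvd := Nat.dvd_of_mod_eq_zero hm0
          have hmul : i / ix * ix = i := Nat.div_mul_cancel hdvd
          have hne : i / ix ≠ s := fun hc => hieq (by rw [← hmul, hc, mul_comm])
          have hcond : (i % ix = 0 ∧ s + 1 ≤ i / ix ∧ i / ix < s + 1 + m ∧ i < L)
              ↔ (i % ix = 0 ∧ s ≤ i / ix ∧ i / ix < s + (m + 1) ∧ i < L) := by
            constructor <;> rintro ⟨a, b, c, d⟩ <;> exact ⟨a, by omega, by omega, d⟩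
          simp only [hcond]
          simp [hieq, hixne]
        · simp [hm0, hieq]

def pvGA (k i : Nat) : Int := if i ≤ k ∨ i ≤ 2 then pvF i else pvG k i

theorem pvStepA_spec (L k : Nat) (hk : 1 ≤ k) (hkL : k + 1 < L) :
    pvStepA (pvMapG L (pvGA k)) (k + 1) = pvMapG L (pvGA (k + 1)) := by
  have hdef : pvStepA (pvMapG L (pvGA k)) (k + 1)
      = pvInnerA (k + 1) ((pvMapG L (pvGA k)).set (k + 1)
          (min ((pvMapG L (pvGA k)).getD (k + 1) 0) ((pvMapG L (pvGA k)).getD k 0 + 1)))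
          (List.range' 2 k) := rfl
  rw [hdef, pvMapG_getD _ _ _ 0 hkL, pvMapG_getD _ _ _ 0 (by omega), pvMapG_set _ _ _ _ hkL]
  have hgak : pvGA k k = pvF k := by simp [pvGA]
  rw [hgak]
  have hv : min (pvGA k (k + 1)) (pvF k + 1) = pvF (k + 1) := by
    by_cases h2 : k = 1
    · subst h2
      have h12 : pvGA 1 2 = pvF 2 := by simp [pvGA]
      rw [h12]
      simp [pvF]
    · have hk2 : 2 ≤ k := by omega
      have hga : pvGA k (k + 1) = pvG k (k + 1) := by
        rw [pvGA, if_neg (by omega)]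
      rw [hga, ← pvKey k hk2]
  rw [hv, pvInnerA_spec L (k + 1) (by omega) hkL k 2 _ (by omega)]
  apply pvMapG_congr
  intro i hi
  by_cases hcond : i % (k + 1) = 0 ∧ 2 ≤ i / (k + 1) ∧ i / (k + 1) < 2 + k ∧ i < L
  · obtain ⟨hm0, h2q, hqk, hiL⟩ := hcond
    have hdvd := Nat.dvd_of_mod_eq_zero hm0
    have hmul : i / (k + 1) * (k + 1) = i := Nat.div_mul_cancel hdvd
    have hbig : 2 * (k + 1) ≤ i := by
      calc 2 * (k + 1) ≤ i / (k + 1) * (k + 1) := Nat.mul_le_mul_right _ h2q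
        _ = i := hmul
    rw [if_pos ⟨hm0, h2q, hqk, hiL⟩]
    have hrhs : pvGA (k + 1) i = min (pvG k i) (pvF (k + 1) + 1) := by
      rw [pvGA, if_neg (by omega), pvG_succ k i (by omega), if_pos ⟨hm0, h2q, by omega⟩]
    rw [hrhs]
    have hne1 : ¬ (i = k + 1) := by omega
    have hga2 : ¬ (i ≤ k ∨ i ≤ 2) := by omega
    simp [hne1, pvGA, hga2]
  · rw [if_neg hcond]
    by_cases hieq : i = k + 1
    · subst hieq
      simp [pvGA]
    · simp only [if_neg hieq]
      by_cases hsm : i ≤ k ∨ i ≤ 2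
      · have h' : i ≤ k + 1 ∨ i ≤ 2 := by omega
        simp [pvGA, hsm, h']
      · have h' : ¬ (i ≤ k + 1 ∨ i ≤ 2) := by omega
        simp only [pvGA, if_neg hsm, if_neg h']
        rw [pvG_succ k i (by omega), if_neg]
        rintro ⟨a, b, c⟩
        exact hcond ⟨a, b, by omega, hi⟩

theorem pvLoopA (L : Nat) (h3 : 3 ≤ L) : ∀ t, 1 + t ≤ L - 1 →
    (List.range' 2 t).foldl pvStepA (pvMapG L (pvGA 1)) = pvMapG L (pvGA (1 + t)) := by
  intro t
  induction t with
  | zero => intro _; simp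
  | succ t ih =>
    intro h
    have hc := List.range'_concat (s := 2) (n := t) (step := 1)
    simp only [one_mul] at hc
    rw [hc, List.foldl_append, ih (by omega)]
    simp only [List.foldl_cons, List.foldl_nil]
    rw [show 2 + t = (1 + t) + 1 by omega, show 1 + (t + 1) = (1 + t) + 1 by omega]
    exact pvStepA_spec L (1 + t) (by omega) (by omega)

theorem pvA_result (limit : Int) (h : 3 ≤ limit) :
    gen_answers limit = pvMapG limit.toNat pvF := by
  have hL : 3 ≤ limit.toNat := by omega
  have hdef : gen_answers limit = (List.range' 2 (limit.toNat - 2)).foldl pvStepA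
      ((((List.replicate limit.toNat pvINF).set 0 0).set 1 1).set 2 2) := rfl
  rw [hdef, pvInit_spec limit.toNat hL]
  have hbase : pvMapG limit.toNat pvInit = pvMapG limit.toNat (pvGA 1) :=
    pvMapG_congr _ _ _ (fun i _ => by
      by_cases h2 : i ≤ 2
      · simp [pvGA, h2, (pvF_le2 i h2).symm]
      · have hne : ¬ (i ≤ 1 ∨ i ≤ 2) := by omega
        rw [pvGA, if_neg hne, pvG]
        simp [pvInit, pvINF]
        omega)
  rw [hbase, pvLoopA limit.toNat hL (limit.toNat - 2) (by omega)]
  apply pvMapG_congr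
  intro i hi
  simp [pvGA, show i ≤ 1 + (limit.toNat - 2) ∨ i ≤ 2 by omega]

-- ===== VERDICT (by name: the statement is the Claim_ definition above) =====
theorem gen_answers_spec : Claim_equal_gen_answers := by
  intro limit _ hpre
  unfold Spec_gen_answers
  rw [pvA_result limit hpre, pvB_result limit hpre]
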